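-- pv_equiv track=rewrite | github.com/Balakumar5599/Assessment | Program_1.py | color_pair
-- ===== SOURCE A (Python) =====
-- def color_pair(color_string):
--     count=[]
--     for char in color_string:
--         count.append(color_string.count(char))
--     for item in count:
--         if item%2!=0:
--             return False
--     return True
-- ===== SOURCE B (Python) =====
-- def color_pair(color_string):
--     odd = set()
--     for char in color_string:
--         if char in odd:
--             odd.discard(char)
--         else:
--             odd.add(char)
--     return not odd
-- ===== Notes on version B (the rewrite author's own statement) =====
-- stated objective: faster
-- what changed: Replaced the per-character whole-string count pass (quadratic) plus parity scan by a single pass toggling a parity set and testing its emptiness.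
import Mathlib
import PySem

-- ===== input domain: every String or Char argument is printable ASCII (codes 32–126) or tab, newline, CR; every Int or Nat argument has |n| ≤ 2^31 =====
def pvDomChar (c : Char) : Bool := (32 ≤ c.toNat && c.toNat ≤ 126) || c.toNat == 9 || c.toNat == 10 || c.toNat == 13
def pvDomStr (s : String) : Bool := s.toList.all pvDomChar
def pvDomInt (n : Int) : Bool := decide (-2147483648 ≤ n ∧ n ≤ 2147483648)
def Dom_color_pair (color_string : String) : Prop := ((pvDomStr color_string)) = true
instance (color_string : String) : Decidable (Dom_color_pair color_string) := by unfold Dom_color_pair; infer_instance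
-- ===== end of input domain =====

-- B replaces A's per-character whole-string count (quadratic) by a single parity-set toggle pass.

-- ===== PORT A =====
-- second loop of A: 'for item in count: if item%2!=0: return False' then 'return True'
-- (item is a count, hence ≥ 0, so Lean's Int % agrees with Python's % here)
def color_pair_check : List Int → Bool
  | [] => true
  | item :: rest => if item % 2 ≠ 0 then false else color_pair_check rest

def color_pair (color_string : String) : Bool :=
  -- 'count=[]; for char in color_string: count.append(color_string.count(char))'
  -- Python str.count with a single-character needle is exactly List.count on the characters
  let count : List Int :=
    color_string.toList.foldl
      (fun acc char => acc ++ [(color_string.toList.count char : Int)]) []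
  color_pair_check count

-- ===== PORT B =====
def color_pair_alt (color_string : String) : Bool :=
  let odd : PySem.Set Char :=
    color_string.toList.foldl
      (fun odd char =>
        if PySem.Set.contains odd char then PySem.Set.discard odd char
        else PySem.Set.add odd char)
      PySem.Set.empty
  odd.isEmpty

-- ===== PRECONDITION & SPEC =====
def Spec_color_pair (color_string : String) (out : Bool) : Prop := out = color_pair_alt color_string
instance (color_string : String) (out : Bool) : Decidable (Spec_color_pair color_string out) := by unfold Spec_color_pair; infer_instance

-- ===== CLAIM (what is proved, stated in full; the proofs are below) =====
def Claim_equal_color_pair : Prop := ∀ (color_string : String), Dom_color_pair color_string → Spec_color_pair color_string (color_pair color_string)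

-- ===== LEMMAS AND PROOFS =====

theorem color_pair_check_iff (xs : List Int) :
    color_pair_check xs = true ↔ ∀ x ∈ xs, x % 2 = 0 := by
  induction xs with
  | nil => simp [color_pair_check]
  | cons x rest ih =>
    by_cases h : x % 2 = 0
    · simp only [color_pair_check, if_neg (show ¬ x % 2 ≠ 0 from by omega), ih, List.mem_cons]
      constructor
      · rintro ha y (rfl | hy)
        · exact h
        · exact ha y hy
      · intro ha y hy; exact ha y (Or.inr hy)
    · simp only [color_pair_check, if_pos h, List.mem_cons]
      constructor
      · intro hf; cases hf
      · intro ha; exact absurd (ha x (Or.inl rfl)) h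

abbrev pvStep : PySem.Set Char → Char → PySem.Set Char :=
  fun odd char =>
    if PySem.Set.contains odd char then PySem.Set.discard odd char
    else PySem.Set.add odd char

theorem toggle_mem (l : List Char) (s : PySem.Set Char) (c : Char) :
    (c ∈ l.foldl pvStep s) ↔
      ((c ∈ s ∧ l.count c % 2 = 0) ∨ (c ∉ s ∧ l.count c % 2 = 1)) := by
  induction l generalizing s with
  | nil => simp
  | cons x t ih =>
    simp only [List.foldl_cons]
    rw [ih]
    have hcnt : (x :: t).count c = t.count c + (if x = c then 1 else 0) := by
      simp [List.count_cons]
    by_cases hx : PySem.Set.contains s x = true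
    · have hxs : x ∈ s := (PySem.Set.contains_iff s x).mp hx
      have hstep : pvStep s x = PySem.Set.discard s x := by unfold pvStep; rw [if_pos hx]
      rw [hstep, PySem.Set.mem_discard]
      by_cases hcx : x = c
      · subst hcx
        simp [hxs, hcnt]
        omega
      · have hcx' : ¬ c = x := fun h => hcx h.symm
        simp [hcx', hcx, hcnt]
    · have hxs : x ∉ s := fun h => hx ((PySem.Set.contains_iff s x).mpr h)
      have hstep : pvStep s x = PySem.Set.add s x := by unfold pvStep; rw [if_neg hx]
      rw [hstep, PySem.Set.mem_add]
      by_cases hcx : x = c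
      · subst hcx
        simp [hxs, hcnt]
        omega
      · have hcx' : ¬ c = x := fun h => hcx h.symm
        simp [hcx', hcx, hcnt]

theorem toggle_empty_iff (l : List Char) :
    (l.foldl pvStep PySem.Set.empty = []) ↔ ∀ c ∈ l, l.count c % 2 = 0 := by
  rw [List.eq_nil_iff_forall_not_mem]
  constructor
  · intro h c hc
    have := h c
    rw [toggle_mem] at this
    simp [PySem.Set.empty] at this
    omega
  · intro h c
    rw [toggle_mem]
    simp [PySem.Set.empty]
    by_cases hc : c ∈ l
    · have := h c hc; omega
    · have : l.count c = 0 := List.count_eq_zero.mpr hc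
      omega

-- characterising A's result on the same characters
theorem color_pair_eq (s : String) :
    color_pair s = true ↔ ∀ c ∈ s.toList, s.toList.count c % 2 = 0 := by
  unfold color_pair
  rw [color_pair_check_iff]
  have hmap : s.toList.foldl
      (fun acc char => acc ++ [(s.toList.count char : Int)]) []
      = s.toList.map (fun char => (s.toList.count char : Int)) := by
    simpa using PySem.List.foldl_append_singleton_eq_map
      (l := s.toList) (f := fun char => (s.toList.count char : Int)) (acc := [])
  rw [hmap]
  simp only [List.mem_map]
  constructor
  · intro h c hc
    have := h _ ⟨c, hc, rfl⟩
    omega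
  · rintro h x ⟨c, hc, rfl⟩
    have := h c hc
    omega

-- ===== VERDICT (by name: the statement is the Claim_ definition above) =====
theorem color_pair_spec : Claim_equal_color_pair := by
  intro s _
  unfold Spec_color_pair color_pair_alt
  show color_pair s = (s.toList.foldl pvStep PySem.Set.empty).isEmpty
  by_cases h : ∀ c ∈ s.toList, s.toList.count c % 2 = 0
  · have hA := (color_pair_eq s).mpr h
    have hB := (toggle_empty_iff s.toList).mpr h
    rw [hA, hB]
    rfl
  · have hA : color_pair s = false := by
      cases hcp : color_pair s
      · rfl
      · exact absurd ((color_pair_eq s).mp hcp) h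
    have hB : ¬ (s.toList.foldl pvStep PySem.Set.empty = []) :=
      fun he => h ((toggle_empty_iff s.toList).mp he)
    rw [hA]
    cases hfold : s.toList.foldl pvStep PySem.Set.empty with
    | nil => exact absurd hfold hB
    | cons a b => rfl
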